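-- pv_equiv track=rewrite | github.com/calebxu777/Web_Agent | mvp/evaluation/evaluator.py | _requested_comparison
-- ===== SOURCE A (Python) =====
-- def _requested_comparison(user_text: str) -> bool:
--     lowered = user_text.lower()
--     markers = [
--         "compare",
--         "vs",
--         "versus",
--         "difference",
--         "better",
--         "which one",
--         "head to head",
--     ]
--     return any(marker in lowered for marker in markers)
-- ===== SOURCE B (Python) =====
-- def _requested_comparison(user_text: str) -> bool:
--     # One left-to-right pass over the text: at each position, test whether any
--     # marker starts there (prefix check), instead of seven separate substring scans.
--     markers = (
--         "compare",
--         "vs",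
--         "versus",
--         "difference",
--         "better",
--         "which one",
--         "head to head",
--     )
--     lowered = user_text.lower()
--     return any(
--         lowered.startswith(m, i)
--         for i in range(len(lowered) + 1)
--         for m in markers
--     )
-- ===== Notes on version B (the rewrite author's own statement) =====
-- stated objective: alternative
-- what changed: B makes a single left-to-right pass over the lowered text, testing at each position whether any marker starts there, instead of A's seven independent substring-containment scans.
import Mathlib
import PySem

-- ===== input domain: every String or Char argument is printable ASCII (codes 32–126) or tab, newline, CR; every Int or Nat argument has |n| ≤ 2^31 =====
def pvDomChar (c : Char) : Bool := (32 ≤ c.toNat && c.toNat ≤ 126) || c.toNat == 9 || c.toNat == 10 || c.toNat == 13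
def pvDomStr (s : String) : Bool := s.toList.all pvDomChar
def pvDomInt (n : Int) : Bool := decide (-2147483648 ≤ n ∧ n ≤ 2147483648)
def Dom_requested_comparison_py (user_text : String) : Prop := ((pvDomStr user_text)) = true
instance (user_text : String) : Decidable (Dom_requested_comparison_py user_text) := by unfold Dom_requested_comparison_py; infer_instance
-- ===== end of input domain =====

-- B scans the lowered text once, position by position, testing each marker as a prefix there,
-- instead of A's per-marker substring-containment scans (objective: alternative; same result).


-- ===== PORT A =====
def pvMarkers : List String :=
  ["compare", "vs", "versus", "difference", "better", "which one", "head to head"]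

def requested_comparison_py (user_text : String) : Bool :=
  let lowered := PySem.Str.lower user_text
  pvMarkers.any (fun marker => PySem.Str.isIn marker lowered)

-- ===== PORT B =====
def requested_comparison_py_alt (user_text : String) : Bool :=
  let lowered := (PySem.Str.lower user_text).toList
  (List.range (lowered.length + 1)).any (fun i =>
    pvMarkers.any (fun m => PySem.Chars.startswith (lowered.drop i) m.toList))

-- ===== PRECONDITION & SPEC =====
def Spec_requested_comparison_py (user_text : String) (out : Bool) : Prop := out = requested_comparison_py_alt user_text
instance (user_text : String) (out : Bool) : Decidable (Spec_requested_comparison_py user_text out) := by unfold Spec_requested_comparison_py; infer_instance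

-- ===== CLAIM (what is proved, stated in full; the proofs are below) =====
def Claim_equal_requested_comparison_py : Prop := ∀ (user_text : String), Dom_requested_comparison_py user_text → Spec_requested_comparison_py user_text (requested_comparison_py user_text)

-- ===== LEMMAS AND PROOFS =====

-- a marker occurs as a substring iff it is a prefix at some position i <= length
theorem pv_isIn_iff_pos (s m : List Char) :
    PySem.Chars.isIn m s = true ↔
      ∃ i < s.length + 1, PySem.Chars.startswith (s.drop i) m = true := by
  rw [PySem.Chars.isIn_iff_infix]
  simp only [PySem.Chars.startswith_iff]
  constructor
  · rintro ⟨pre, post, ht⟩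
    have hle : pre.length ≤ s.length := by
      have := congrArg List.length ht
      simp at this; omega
    refine ⟨pre.length, by omega, ?_⟩
    have hdrop : s.drop pre.length = m ++ post := by
      have := congrArg (List.drop pre.length) ht
      simp at this
      exact this.symm
    rw [hdrop]
    exact ⟨post, rfl⟩
  · rintro ⟨i, _, t, ht⟩
    exact ⟨s.take i, t, by rw [List.append_assoc, ht]; simp⟩

theorem pv_main (s : List Char) :
    pvMarkers.any (fun marker => PySem.Chars.isIn marker.toList s) =
      (List.range (s.length + 1)).any (fun i =>
        pvMarkers.any (fun m => PySem.Chars.startswith (s.drop i) m.toList)) := by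
  rw [Bool.eq_iff_iff]
  simp only [List.any_eq_true, List.mem_range]
  constructor
  · rintro ⟨m, hm, h⟩
    rcases (pv_isIn_iff_pos s m.toList).mp h with ⟨i, hi, hpre⟩
    exact ⟨i, hi, m, hm, hpre⟩
  · rintro ⟨i, hi, m, hm, hpre⟩
    exact ⟨m, hm, (pv_isIn_iff_pos s m.toList).mpr ⟨i, hi, hpre⟩⟩

-- ===== VERDICT (by name: the statement is the Claim_ definition above) =====
theorem requested_comparison_py_spec : Claim_equal_requested_comparison_py := by
  intro user_text _
  unfold Spec_requested_comparison_py requested_comparison_py requested_comparison_py_alt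
  have := pv_main (PySem.Str.lower user_text).toList
  simpa using this
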